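-- pv_equiv track=rewrite | github.com/Odrec/discord-movie-rating-bot | bot.py | backtrack_shuffle
-- ===== SOURCE A (Python) =====
-- from typing import List, Dict, Optional
--
-- def backtrack_shuffle(playlist: List[str], movie_counts: Dict[str, int]) -> Optional[List[str]]:
--     """Use backtracking to find a valid arrangement with no consecutive duplicates"""
--     remaining = dict(movie_counts)
--     result = []
--
--     def backtrack():
--         if len(result) == len(playlist):
--             return True
--
--         # Get available movies (not same as last placed)
--         last_movie = result[-1] if result else None
--         available_movies = [movie for movie, count in remaining.items()
--                          if count > 0 and movie != last_movie]
--
--         if not available_movies: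
--             # No valid movies available, try to place any remaining movie
--             available_movies = [movie for movie, count in remaining.items() if count > 0]
--             if not available_movies:
--                 return False
--
--         # Sort by remaining count (descending) to prioritize movies that need placement
--         available_movies.sort(key=lambda x: remaining[x], reverse=True)
--
--         for movie in available_movies:
--             # Place this movie
--             result.append(movie)
--             remaining[movie] -= 1
--
--             # Recursively try to complete the arrangement
--             if backtrack():
--                 return True
--
--             # Backtrack
--             result.pop()
--             remaining[movie] += 1
--
--         return False
--
--     if backtrack():
--         return result
--     return None
-- ===== SOURCE B (Python) =====
-- from typing import List, Dict, Optional
--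
-- def backtrack_shuffle(playlist: List[str], movie_counts: Dict[str, int]) -> Optional[List[str]]:
--     """Iterative flat-array arrangement: a pool of (movie, count) pairs and explicit
--     first-argmax index scans; no recursion, no backtracking, no sorting, no dict."""
--     pool = list(movie_counts.items())
--     out = []
--     last = None
--     for _ in range(len(playlist)):
--         best = None
--         for i, (m, c) in enumerate(pool):
--             if c > 0 and m != last and (best is None or c > best[2]):
--                 best = (i, m, c)
--         if best is None:
--             for i, (m, c) in enumerate(pool):
--                 if c > 0 and (best is None or c > best[2]):
--                     best = (i, m, c)
--         if best is None:
--             return None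
--         i, m, c = best
--         pool[i] = (m, c - 1)
--         out.append(m)
--         last = m
--     return out
-- ===== Notes on version B (the rewrite author's own statement) =====
-- stated objective: alternative
-- what changed: Replaced the recursive backtracking search (stable descending sort each step, first-success recursion with append/pop state restoration, dict of remaining counts) by a flat iterative loop over a list of (movie, count) pairs that each step finds the placement by two explicit first-argmax index scans (movies differing from the last placed, then any) and decrements in place; equivalence holds because A's fallback guarantees its first sorted branch fails only when every branch fails, so A's answer is exactly this greedy choice.
import Mathlib
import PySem

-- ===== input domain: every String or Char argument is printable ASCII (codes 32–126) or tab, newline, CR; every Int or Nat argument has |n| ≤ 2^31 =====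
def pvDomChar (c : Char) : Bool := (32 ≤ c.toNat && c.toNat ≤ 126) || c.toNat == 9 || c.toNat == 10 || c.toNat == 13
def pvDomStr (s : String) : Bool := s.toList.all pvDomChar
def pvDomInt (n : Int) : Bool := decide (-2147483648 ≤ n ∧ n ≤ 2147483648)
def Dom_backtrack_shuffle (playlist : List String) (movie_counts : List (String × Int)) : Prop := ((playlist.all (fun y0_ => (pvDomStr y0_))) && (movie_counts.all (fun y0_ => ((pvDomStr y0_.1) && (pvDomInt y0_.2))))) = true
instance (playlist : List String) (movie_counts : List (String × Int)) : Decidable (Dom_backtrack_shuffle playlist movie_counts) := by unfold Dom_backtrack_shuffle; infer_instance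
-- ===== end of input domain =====

-- B replaces A's recursive backtracking (sort + first-success recursion with append/pop
-- state restoration) by a flat iterative loop over a (movie, count) pool with explicit
-- first-argmax index scans: no recursion, no sorting, no dict. Objective: alternative.

-- ===== PORT A =====
-- the nested function backtrack(); the mutated result/remaining are threaded as arguments
-- (on failure Python restores both, so failure = none with state unchanged); fuel bounds the
-- recursion depth (each call appends one element, so playlist.length + 1 is never exhausted)
def backtrackGo (playlist : List String) : Nat → PySem.Dict String Int → List String → Option (List String)
  | 0, _, _ => none
  | fuel + 1, remaining, result =>
    if result.length = playlist.length then some result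
    else
      -- last_movie = result[-1] if result else None
      let last_movie : Option String := PySem.List.pyGet? result (-1)
      let available₁ := (remaining.items.filter
          (fun p => decide (0 < p.2) && decide (some p.1 ≠ last_movie))).map Prod.fst
      let available := if available₁.isEmpty then
          (remaining.items.filter (fun p => decide (0 < p.2))).map Prod.fst
        else available₁
      -- sort descending by remaining count (stable), then 'for movie in …: if backtrack(): return True'
      -- (an empty candidate list falls through to 'return False' = none)
      (PySem.List.sorted available (fun x => remaining.getD x 0) true).findSome?
        (fun movie => backtrackGo playlist fuel (remaining.modify movie 0 (· - 1)) (result ++ [movie]))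

def backtrack_shuffle (playlist : List String) (movie_counts : List (String × Int)) : Option (List String) :=
  backtrackGo playlist (playlist.length + 1) (PySem.Dict.ofList movie_counts) []

-- ===== PORT B =====
-- one scan 'for i, (m, c) in enumerate(pool): if <pred(m, c)> and (best is None or c > best[2]): best = (i, m, c)'
def pvScanB (pool : List (String × Int)) (pred : String × Int → Bool) : Option (Int × String × Int) :=
  (PySem.List.enumerate pool).foldl (fun best x =>
    if pred x.2 && (match best with | none => true | some b => decide (b.2.2 < x.2.2))
    then some (x.1, x.2.1, x.2.2) else best) none

-- the 'for _ in range(len(playlist))' loop of Source B, counting remaining iterations;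
-- pool[i] = (m, c - 1) is pySetD (i is the enumerate index, always in range)
def loopB : List (String × Int) → List String → Option String → Nat → Option (List String)
  | _, out, _, 0 => some out
  | pool, out, last, n + 1 =>
    let b1 := pvScanB pool (fun p => decide (0 < p.2) && decide (some p.1 ≠ last))
    let best := match b1 with
      | none => pvScanB pool (fun p => decide (0 < p.2))
      | some b => some b
    match best with
    | none => none
    | some (i, m, c) => loopB (PySem.List.pySetD pool i (m, c - 1)) (out ++ [m]) (some m) n

def backtrack_shuffle_alt (playlist : List String) (movie_counts : List (String × Int)) : Option (List String) :=
  loopB (PySem.Dict.ofList movie_counts).items [] none playlist.length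

-- ===== PRECONDITION & SPEC =====
def Spec_backtrack_shuffle (playlist : List String) (movie_counts : List (String × Int)) (out : Option (List String)) : Prop := out = backtrack_shuffle_alt playlist movie_counts
instance (playlist : List String) (movie_counts : List (String × Int)) (out : Option (List String)) : Decidable (Spec_backtrack_shuffle playlist movie_counts out) := by unfold Spec_backtrack_shuffle; infer_instance

-- ===== CLAIM (what is proved, stated in full; the proofs are below) =====
def Claim_equal_backtrack_shuffle : Prop := ∀ (playlist : List String) (movie_counts : List (String × Int)), Dom_backtrack_shuffle playlist movie_counts → Spec_backtrack_shuffle playlist movie_counts (backtrack_shuffle playlist movie_counts)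

-- ===== LEMMAS AND PROOFS =====

-- proof-only middle model: the greedy loop on the dict; A is proved equal to it
-- (its first branch fails only when every branch fails), and B is proved equal to it
-- (the argmax scans pick exactly the head of A's stable descending sort).
def greedyGo : PySem.Dict String Int → List String → Nat → Option (List String)
  | _, result, 0 => some result
  | remaining, result, n + 1 =>
    let last : Option String := PySem.List.pyGet? result (-1)
    let cands₁ := (remaining.items.filter
        (fun p => decide (0 < p.2) && decide (some p.1 ≠ last))).map Prod.fst
    let cands := if cands₁.isEmpty then
        (remaining.items.filter (fun p => decide (0 < p.2))).map Prod.fst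
      else cands₁
    match PySem.List.max? cands (fun m => remaining.getD m 0) with
    | none => none
    | some best => greedyGo (remaining.modify best 0 (· - 1)) (result ++ [best]) n

-- the candidate list at a step (definitionally the inline expression)
def pvCands (d : PySem.Dict String Int) (res : List String) : List String :=
  if ((d.items.filter (fun p => decide (0 < p.2) && decide (some p.1 ≠ PySem.List.pyGet? res (-1)))).map Prod.fst).isEmpty
  then (d.items.filter (fun p => decide (0 < p.2))).map Prod.fst
  else (d.items.filter (fun p => decide (0 < p.2) && decide (some p.1 ≠ PySem.List.pyGet? res (-1)))).map Prod.fst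

-- total positive supply still to place
def pvSupply (d : PySem.Dict String Int) : Nat := (d.keys.map (fun k => (d.getD k 0).toNat)).sum

-- one step of Python's max(…, key=…) fold
def pvStep (key : String → Int) : Option String → String → Option String :=
  fun m? x => match m? with
    | none => some x
    | some m => if key m < key x then some x else some m

-- one step of B's index-scan fold
def pvStepB (pred : String × Int → Bool) :
    Option (Int × String × Int) → Int × (String × Int) → Option (Int × String × Int) :=
  fun best x =>
    if pred x.2 && (match best with | none => true | some b => decide (b.2.2 < x.2.2))
    then some (x.1, x.2.1, x.2.2) else best

-- the accumulator correspondence between B's scan and the name-level max fold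
def pvInv (key : String → Int) : Option (Int × String × Int) → Option String → Prop
  | none, none => True
  | some b, some n => n = b.2.1 ∧ key b.2.1 = b.2.2
  | _, _ => False

theorem backtrackGo_succ (playlist : List String) (fuel : Nat) (d : PySem.Dict String Int) (res : List String) :
    backtrackGo playlist (fuel + 1) d res =
      if res.length = playlist.length then some res
      else (PySem.List.sorted (pvCands d res) (fun x => d.getD x 0) true).findSome?
        (fun movie => backtrackGo playlist fuel (d.modify movie 0 (· - 1)) (res ++ [movie])) := rfl

theorem greedyGo_succ (d : PySem.Dict String Int) (res : List String) (n : Nat) :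
    greedyGo d res (n + 1) =
      match PySem.List.max? (pvCands d res) (fun m => d.getD m 0) with
      | none => none
      | some best => greedyGo (d.modify best 0 (· - 1)) (res ++ [best]) n := rfl

theorem greedyGo_succ_none (d : PySem.Dict String Int) (res : List String) (n : Nat)
    (h : PySem.List.max? (pvCands d res) (fun m => d.getD m 0) = none) :
    greedyGo d res (n + 1) = none := by
  rw [greedyGo_succ, h]

theorem greedyGo_succ_some (d : PySem.Dict String Int) (res : List String) (n : Nat) (best : String)
    (h : PySem.List.max? (pvCands d res) (fun m => d.getD m 0) = some best) :
    greedyGo d res (n + 1) = greedyGo (d.modify best 0 (· - 1)) (res ++ [best]) n := by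
  rw [greedyGo_succ, h]

theorem pv_max?_eq_foldl (xs : List String) (key : String → Int) :
    PySem.List.max? xs key = xs.foldl (pvStep key) none := by
  unfold PySem.List.max?
  congr 1
  funext m? x
  cases m? <;> simp [pvStep]

theorem pv_head_insertBy (key : String → Int) (x : String) (ys : List String) :
    (PySem.List.insertBy (fun a b => decide (key b < key a)) x ys).head? = pvStep key ys.head? x := by
  cases ys with
  | nil => rfl
  | cons h t =>
    simp only [PySem.List.insertBy, List.head?]
    by_cases hlt : key h < key x <;> simp [pvStep, hlt]

theorem pv_head_foldl_insertBy (key : String → Int) (xs : List String) : ∀ (acc : List String),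
    (xs.foldl (fun acc x => PySem.List.insertBy (fun a b => decide (key b < key a)) x acc) acc).head? =
      xs.foldl (pvStep key) acc.head? := by
  induction xs with
  | nil => intro acc; rfl
  | cons x t ih =>
    intro acc
    simp only [List.foldl_cons, ih, pv_head_insertBy]

theorem pv_head_sorted_rev (xs : List String) (key : String → Int) :
    (PySem.List.sorted xs key true).head? = PySem.List.max? xs key := by
  rw [PySem.List.sorted_rev_eq_foldl_insertBy, pv_head_foldl_insertBy, pv_max?_eq_foldl]
  rfl

theorem pv_sum_succ (f g : String → Nat) (m : String) : ∀ (l : List String), l.Nodup → m ∈ l →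
    (∀ x ∈ l, x ≠ m → g x = f x) → g m + 1 = f m →
    (l.map g).sum + 1 = (l.map f).sum := by
  intro l
  induction l with
  | nil => intro _ hm; cases hm
  | cons a t ih =>
    intro hnd hm hg hgm
    rcases List.nodup_cons.mp hnd with ⟨hat, hndt⟩
    rcases List.mem_cons.mp hm with hm | hm
    · subst hm
      have ht : ∀ x ∈ t, g x = f x := fun x hx =>
        hg x (List.mem_cons_of_mem _ hx) (fun hxm => hat (hxm ▸ hx))
      simp only [List.map_cons, List.sum_cons, List.map_congr_left ht]
      omega
    · have ham : a ≠ m := fun h => hat (h ▸ hm)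
      have := ih hndt hm (fun x hx => hg x (List.mem_cons_of_mem _ hx)) hgm
      simp only [List.map_cons, List.sum_cons]
      rw [hg a (by simp) ham]
      omega

theorem pv_mem_pvCands (d : PySem.Dict String Int) (res : List String) (m : String)
    (hnd : d.keys.Nodup) (hm : m ∈ pvCands d res) : m ∈ d.keys ∧ 0 < d.getD m 0 := by
  have hex : ∃ p ∈ d.items, p.1 = m ∧ 0 < p.2 := by
    unfold pvCands at hm
    split at hm <;>
    · rcases List.mem_map.mp hm with ⟨p, hp, hpm⟩
      have hf := List.of_mem_filter hp
      simp only [Bool.and_eq_true, decide_eq_true_eq] at hf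
      exact ⟨p, List.mem_of_mem_filter hp, hpm, by first | exact hf | exact hf.1⟩
  rcases hex with ⟨⟨k, v⟩, hp, hk, hv⟩
  subst hk
  have h1 : k ∈ d.keys := by simpa using PySem.Dict.mem_keys_of_mem_items d hp
  have h2 : d.getD k 0 = v := PySem.Dict.getD_of_mem_items d hp hnd 0
  exact ⟨h1, by rw [h2]; exact hv⟩

theorem pv_supply_zero_iff (d : PySem.Dict String Int) (hnd : d.keys.Nodup) :
    pvSupply d = 0 ↔ ∀ p ∈ d.items, ¬ 0 < p.2 := by
  unfold pvSupply
  rw [List.sum_eq_zero_iff]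
  constructor
  · intro h p hp hpos
    have hk : p.1 ∈ d.keys := by simpa using PySem.Dict.mem_keys_of_mem_items d hp
    have hv : d.getD p.1 0 = p.2 := PySem.Dict.getD_of_mem_items d hp hnd 0
    have := h ((d.getD p.1 0).toNat) (List.mem_map.mpr ⟨p.1, hk, rfl⟩)
    omega
  · intro h n hn
    rcases List.mem_map.mp hn with ⟨k, hk, rfl⟩
    have hk' : k ∈ d.items.map Prod.fst := by simpa [PySem.Dict.keys] using hk
    rcases List.mem_map.mp hk' with ⟨p, hp, hpk⟩
    subst hpk
    have hv : d.getD p.1 0 = p.2 := PySem.Dict.getD_of_mem_items d hp hnd 0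
    have := h p hp
    omega

theorem pv_pvCands_nil_iff (d : PySem.Dict String Int) (res : List String)
    (hnd : d.keys.Nodup) : pvCands d res = [] ↔ pvSupply d = 0 := by
  constructor
  · intro h
    rw [pv_supply_zero_iff d hnd]
    unfold pvCands at h
    split at h
    · intro p hp hpos
      have hmem : p ∈ d.items.filter (fun p => decide (0 < p.2)) :=
        List.mem_filter.mpr ⟨hp, by simpa using hpos⟩
      rw [List.map_eq_nil_iff.mp h] at hmem
      cases hmem
    · next hne => exact absurd h (by simpa [List.isEmpty_iff] using hne)
  · intro hz
    have hforall := (pv_supply_zero_iff d hnd).mp hz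
    have h2 : d.items.filter (fun p => decide (0 < p.2)) = [] :=
      List.filter_eq_nil_iff.mpr (fun p hp => by simpa using hforall p hp)
    have h1 : d.items.filter
        (fun p => decide (0 < p.2) && decide (some p.1 ≠ PySem.List.pyGet? res (-1))) = [] :=
      List.filter_eq_nil_iff.mpr (fun p hp => by have := hforall p hp; simp_all)
    unfold pvCands
    rw [h1, h2]
    simp

theorem pv_keys_modify_dec (d : PySem.Dict String Int) (m : String) (hm : m ∈ d.keys) :
    (d.modify m 0 (· - 1)).keys = d.keys := by
  have hc : d.contains m = true := by
    rw [PySem.Dict.contains_eq_decide_mem_keys]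
    simp [hm]
  rw [PySem.Dict.keys_modify]
  exact PySem.Dict.keys_insert_of_contains d _ hc

theorem pv_supply_modify (d : PySem.Dict String Int) (m : String)
    (hnd : d.keys.Nodup) (hm : m ∈ d.keys) (hpos : 0 < d.getD m 0) :
    pvSupply (d.modify m 0 (· - 1)) + 1 = pvSupply d := by
  unfold pvSupply
  rw [pv_keys_modify_dec d m hm]
  exact pv_sum_succ (fun k => (d.getD k 0).toNat)
    (fun k => ((d.modify m 0 (· - 1)).getD k 0).toNat) m d.keys hnd hm
    (fun x _ hx => by
      show ((d.modify m 0 (· - 1)).getD x 0).toNat = (d.getD x 0).toNat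
      rw [PySem.Dict.getD_modify, if_neg hx])
    (by
      show ((d.modify m 0 (· - 1)).getD m 0).toNat + 1 = (d.getD m 0).toNat
      rw [PySem.Dict.getD_modify, if_pos rfl]
      omega)

theorem pv_greedy_none (n : Nat) : ∀ (d : PySem.Dict String Int) (res : List String),
    d.keys.Nodup → (greedyGo d res n = none ↔ pvSupply d < n) := by
  induction n with
  | zero => intro d res _; simp [greedyGo]
  | succ n ih =>
    intro d res hnd
    cases hmax : PySem.List.max? (pvCands d res) (fun m => d.getD m 0) with
    | none =>
      rw [greedyGo_succ_none d res n hmax]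
      have hz : pvSupply d = 0 :=
        (pv_pvCands_nil_iff d res hnd).mp ((PySem.List.max?_eq_none_iff _ _).mp hmax)
      simp [hz]
    | some best =>
      rw [greedyGo_succ_some d res n best hmax]
      rcases pv_mem_pvCands d res best hnd (PySem.List.max?_mem hmax) with ⟨hkb, hposb⟩
      have hndm : (d.modify best 0 (· - 1)).keys.Nodup := by
        rw [pv_keys_modify_dec d best hkb]; exact hnd
      rw [ih _ _ hndm]
      have := pv_supply_modify d best hnd hkb hposb
      omega

theorem pv_main (playlist : List String) : ∀ (fuel : Nat) (d : PySem.Dict String Int) (res : List String),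
    d.keys.Nodup → res.length ≤ playlist.length → playlist.length - res.length < fuel →
    backtrackGo playlist fuel d res = greedyGo d res (playlist.length - res.length) := by
  intro fuel
  induction fuel with
  | zero => intro d res _ _ h; omega
  | succ fuel ih =>
    intro d res hnd hle hfuel
    rw [backtrackGo_succ]
    by_cases hlen : res.length = playlist.length
    · rw [if_pos hlen, hlen]
      simp [greedyGo]
    · rw [if_neg hlen]
      have hlt : res.length < playlist.length := lt_of_le_of_ne hle hlen
      obtain ⟨k', hk'⟩ : ∃ k', playlist.length - res.length = k' + 1 :=
        ⟨playlist.length - res.length - 1, by omega⟩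
      have hstep : ∀ m ∈ pvCands d res,
          backtrackGo playlist fuel (d.modify m 0 (· - 1)) (res ++ [m]) =
            greedyGo (d.modify m 0 (· - 1)) (res ++ [m]) k' := by
        intro m hm
        rcases pv_mem_pvCands d res m hnd hm with ⟨hk, _⟩
        have hndm : (d.modify m 0 (· - 1)).keys.Nodup := by
          rw [pv_keys_modify_dec d m hk]; exact hnd
        have := ih (d.modify m 0 (· - 1)) (res ++ [m]) hndm (by simp; omega) (by simp; omega)
        have h3 : playlist.length - (res ++ [m]).length = k' := by simp; omega
        rw [h3] at this
        exact this
      cases hs : PySem.List.sorted (pvCands d res) (fun x => d.getD x 0) true with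
      | nil =>
        have hnil : pvCands d res = [] := (PySem.List.sorted_eq_nil_iff _ _ _).mp hs
        rw [hk', greedyGo_succ_none d res k' (by rw [hnil]; rfl)]
        exact List.findSome?_nil
      | cons m rest =>
        have hmax : PySem.List.max? (pvCands d res) (fun x => d.getD x 0) = some m := by
          rw [← pv_head_sorted_rev, hs]; rfl
        have hmem : m ∈ pvCands d res := by
          have : m ∈ PySem.List.sorted (pvCands d res) (fun x => d.getD x 0) true := by
            rw [hs]; simp
          exact (PySem.List.mem_sorted _ _ _ _).mp this
        rw [hk', greedyGo_succ_some d res k' m hmax]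
        have hA1 := hstep m hmem
        cases hg : greedyGo (d.modify m 0 (· - 1)) (res ++ [m]) k' with
        | some r =>
          rw [List.findSome?_cons_of_isSome (by rw [hA1, hg]; rfl)]
          rw [hA1]
          exact hg
        | none =>
          -- the first (greedy) branch failed: supply is insufficient, so every sibling fails
          rw [List.findSome?_cons_of_isNone (by rw [hA1, hg]; rfl)]
          rcases pv_mem_pvCands d res m hnd hmem with ⟨hk, hpos⟩
          have hsupm : pvSupply (d.modify m 0 (· - 1)) < k' :=
            (pv_greedy_none k' _ _ (by rw [pv_keys_modify_dec d m hk]; exact hnd)).mp hg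
          apply List.findSome?_eq_none_iff.mpr
          intro m' hm'
          have hmem' : m' ∈ pvCands d res := by
            have : m' ∈ PySem.List.sorted (pvCands d res) (fun x => d.getD x 0) true := by
              rw [hs]; exact List.mem_cons_of_mem _ hm'
            exact (PySem.List.mem_sorted _ _ _ _).mp this
          rcases pv_mem_pvCands d res m' hnd hmem' with ⟨hk2, hpos2⟩
          rw [hstep m' hmem']
          apply (pv_greedy_none k' _ _ (by rw [pv_keys_modify_dec d m' hk2]; exact hnd)).mpr
          have e1 := pv_supply_modify d m hnd hk hpos
          have e2 := pv_supply_modify d m' hnd hk2 hpos2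
          omega

-- ===== B = greedy =====

theorem pvScanB_eq_foldl (pool : List (String × Int)) (pred : String × Int → Bool) :
    pvScanB pool pred = (PySem.List.enumerate pool).foldl (pvStepB pred) none := rfl

-- any some-result of the scan fold names an element of the scanned list satisfying pred
theorem pv_scan_result (pred : String × Int → Bool) :
    ∀ (l : List (Int × (String × Int))) (acc : Option (Int × String × Int)),
    l.foldl (pvStepB pred) acc = acc ∨
      ∃ x ∈ l, pred x.2 = true ∧ l.foldl (pvStepB pred) acc = some (x.1, x.2.1, x.2.2) := by
  intro l
  induction l with
  | nil => intro acc; left; rfl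
  | cons x t ih =>
    intro acc
    simp only [List.foldl_cons]
    by_cases hc : (pred x.2 && (match acc with
        | none => true | some b => decide (b.2.2 < x.2.2))) = true
    · have hstep : pvStepB pred acc x = some (x.1, x.2.1, x.2.2) := by
        unfold pvStepB; rw [if_pos hc]
      rcases ih (pvStepB pred acc x) with h | ⟨y, hy, hpy, hres⟩
      · right
        refine ⟨x, by simp, ?_, by rw [h, hstep]⟩
        simp only [Bool.and_eq_true] at hc
        exact hc.1
      · right; exact ⟨y, List.mem_cons_of_mem _ hy, hpy, hres⟩
    · have hstep : pvStepB pred acc x = acc := by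
        unfold pvStepB; rw [if_neg hc]
      rw [hstep]
      rcases ih acc with h | ⟨y, hy, hpy, hres⟩
      · left; exact h
      · right; exact ⟨y, List.mem_cons_of_mem _ hy, hpy, hres⟩

-- the scan fold and the name-level max fold stay in correspondence
theorem pv_scan_vs_max (key : String → Int) (pred : String × Int → Bool) :
    ∀ (pool : List (String × Int)) (s : Int)
      (accB : Option (Int × String × Int)) (accN : Option String),
    (∀ p ∈ pool, key p.1 = p.2) → pvInv key accB accN →
    pvInv key ((PySem.List.enumerate pool s).foldl (pvStepB pred) accB)
      (((pool.filter pred).map Prod.fst).foldl (pvStep key) accN) := by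
  intro pool
  induction pool with
  | nil => intro s accB accN _ hinv; exact hinv
  | cons p t ih =>
    intro s accB accN hkey hinv
    rw [PySem.List.enumerate_cons]
    simp only [List.foldl_cons, List.filter_cons]
    have hkp : key p.1 = p.2 := hkey p (by simp)
    have hkt : ∀ q ∈ t, key q.1 = q.2 := fun q hq => hkey q (List.mem_cons_of_mem _ hq)
    by_cases hp : pred p = true
    · rw [if_pos hp]
      simp only [List.map_cons, List.foldl_cons]
      apply ih (s + 1) _ _ hkt
      -- one matching step on both sides preserves the invariant
      cases accB with
      | none =>
        cases accN with
        | none =>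
          simp only [pvStepB, pvStep, hp, Bool.true_and]
          exact ⟨rfl, hkp⟩
        | some n => exact absurd hinv (by simp [pvInv])
      | some b =>
        cases accN with
        | none => exact absurd hinv (by simp [pvInv])
        | some n =>
          rcases hinv with ⟨hn, hkb⟩
          subst hn
          simp only [pvStepB, pvStep, hp, Bool.true_and, hkb, hkp]
          by_cases hlt : b.2.2 < p.2
          · simp only [hlt, if_pos, decide_true]
            exact ⟨rfl, hkp⟩
          · simp only [hlt, decide_false, if_neg, Bool.false_eq_true, not_false_eq_true]
            exact ⟨rfl, hkb⟩
    · rw [if_neg hp]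
      have hstep : pvStepB pred accB (s, p) = accB := by
        unfold pvStepB
        simp [hp]
      rw [hstep]
      exact ih (s + 1) accB accN hkt hinv

-- with nodup first components, Python's d[k]-style map-replace IS a set at k's index
theorem pv_map_replace_eq_set (m : String) (v : Int) :
    ∀ (l : List (String × Int)) (k : Nat) (c : Int), (l.map Prod.fst).Nodup →
    ∀ (hk : k < l.length), l[k] = (m, c) →
    l.map (fun p => if p.1 == m then (m, v) else p) = l.set k (m, v) := by
  intro l
  induction l with
  | nil => intro k c _ hk; simp at hk
  | cons p t ih =>
    intro k c hnd hk hget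
    rw [List.map_cons, List.nodup_cons] at hnd
    rcases hnd with ⟨hpt, hndt⟩
    cases k with
    | zero =>
      simp only [List.getElem_cons_zero] at hget
      subst hget
      simp only [List.map_cons, BEq.rfl, if_pos, List.set_cons_zero]
      congr 1
      have : ∀ q ∈ t, (fun p => if p.1 == m then (m, v) else p) q = q := by
        intro q hq
        have : q.1 ≠ m := fun h => hpt (h ▸ List.mem_map.mpr ⟨q, hq, rfl⟩)
        simp [this]
      rw [List.map_congr_left this]
      simp
    | succ k =>
      simp only [List.getElem_cons_succ] at hget
      have hm : m ∈ t.map Prod.fst := by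
        have hkt : k < t.length := by simpa using hk
        exact List.mem_map.mpr ⟨(m, c), by rw [← hget]; exact List.getElem_mem hkt, rfl⟩
      have hpm : (p.1 == m) = false := by
        have : p.1 ≠ m := fun h => hpt (h ▸ hm)
        simpa using this
      simp only [List.map_cons, hpm, Bool.false_eq_true, if_neg, List.set_cons_succ,
        not_false_eq_true]
      congr 1
      exact ih k c hndt (by simpa using hk) hget

theorem pv_pyGet_append_last (res : List String) (m : String) :
    PySem.List.pyGet? (res ++ [m]) (-1) = some m := by
  simp [PySem.List.pyGet?, PySem.List.pyIdx?]

-- the decrement step: modify on the dict is exactly B's pool[i] = (m, c - 1)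
theorem pv_items_modify (d : PySem.Dict String Int) (m : String) (c : Int) (k : Nat)
    (hnd : d.keys.Nodup) (hk : k < d.items.length) (hget : d.items[k] = (m, c)) :
    (d.modify m 0 (· - 1)).items = d.items.set k (m, c - 1) := by
  have hmem : (m, c) ∈ d.items := by rw [← hget]; exact List.getElem_mem hk
  have hgd : d.getD m 0 = c := PySem.Dict.getD_of_mem_items d hmem hnd 0
  have hcon : d.contains m = true := by
    rw [PySem.Dict.contains_eq_decide_mem_keys]
    simp only [decide_eq_true_eq]
    simpa using PySem.Dict.mem_keys_of_mem_items d hmem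
  show (d.insert m (d.getD m 0 - 1)).items = _
  rw [PySem.Dict.items_insert_of_contains d _ hcon, hgd]
  exact pv_map_replace_eq_set m (c - 1) d.items k c (by simpa [PySem.Dict.keys] using hnd) hk hget

-- from a some-result of a scan over d.items: index facts and the matching greedy max
theorem pv_scan_some (d : PySem.Dict String Int) (pred : String × Int → Bool)
    (i : Int) (m : String) (c : Int)
    (h : pvScanB d.items pred = some (i, m, c)) :
    ∃ k : Nat, i = (k : Int) ∧ ∃ hk : k < d.items.length, d.items[k] = (m, c) := by
  rw [pvScanB_eq_foldl] at h
  rcases pv_scan_result pred (PySem.List.enumerate d.items) none with hn | ⟨x, hx, _, hres⟩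
  · rw [h] at hn; cases hn
  · have heq := hres.symm.trans h
    simp only [Option.some.injEq, Prod.mk.injEq] at heq
    obtain ⟨hi, hm2, hc2⟩ := heq
    rcases (PySem.List.mem_enumerate_iff _ _ _).mp hx with ⟨k, hk, hxk⟩
    refine ⟨k, ?_, hk, ?_⟩
    · rw [← hi, hxk]
      simp
    · have hx2 : x.2 = d.items[k] := by rw [hxk]
      rw [← hx2, ← hm2, ← hc2]

-- name-level filter used by greedy, for each of the two predicates
theorem pv_loopB_eq_greedy (n : Nat) : ∀ (d : PySem.Dict String Int) (res : List String),
    d.keys.Nodup →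
    loopB d.items res (PySem.List.pyGet? res (-1)) n = greedyGo d res n := by
  induction n with
  | zero => intro d res _; rfl
  | succ n ih =>
    intro d res hnd
    have hkey : ∀ p ∈ d.items, d.getD p.1 0 = p.2 := by
      intro p hp
      exact PySem.Dict.getD_of_mem_items d (by rw [← Prod.mk.eta (p := p)] at hp; exact hp) hnd 0
    have hkey' : ∀ p ∈ d.items, (fun x => d.getD x 0) p.1 = p.2 := hkey
    set key : String → Int := fun x => d.getD x 0 with hkeydef
    set pred₁ : String × Int → Bool :=
      fun p => decide (0 < p.2) && decide (some p.1 ≠ PySem.List.pyGet? res (-1)) with hp1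
    set pred₂ : String × Int → Bool := fun p => decide (0 < p.2) with hp2
    have inv₁ : pvInv key (pvScanB d.items pred₁)
        (PySem.List.max? ((d.items.filter pred₁).map Prod.fst) key) := by
      rw [pv_max?_eq_foldl, pvScanB_eq_foldl]
      exact pv_scan_vs_max key pred₁ d.items 0 none none hkey' trivial
    have inv₂ : pvInv key (pvScanB d.items pred₂)
        (PySem.List.max? ((d.items.filter pred₂).map Prod.fst) key) := by
      rw [pv_max?_eq_foldl, pvScanB_eq_foldl]
      exact pv_scan_vs_max key pred₂ d.items 0 none none hkey' trivial
    -- shared continuation once a scan has produced the entry to place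
    have hcont : ∀ (i : Int) (m : String) (c : Int) (pred : String × Int → Bool),
        pvScanB d.items pred = some (i, m, c) →
        loopB (PySem.List.pySetD d.items i (m, c - 1)) (res ++ [m]) (some m) n =
          greedyGo (d.modify m 0 (· - 1)) (res ++ [m]) n := by
      intro i m c pred hscan
      rcases pv_scan_some d pred i m c hscan with ⟨k, hik, hk, hget⟩
      have hmem : (m, c) ∈ d.items := by rw [← hget]; exact List.getElem_mem hk
      have hmk : m ∈ d.keys := by simpa using PySem.Dict.mem_keys_of_mem_items d hmem
      have hnd' : (d.modify m 0 (· - 1)).keys.Nodup := by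
        rw [pv_keys_modify_dec d m hmk]; exact hnd
      have hitems : PySem.List.pySetD d.items i (m, c - 1) = (d.modify m 0 (· - 1)).items := by
        rw [hik, PySem.List.pySetD_natCast, pv_items_modify d m c k hnd hk hget]
      rw [hitems]
      have := ih (d.modify m 0 (· - 1)) (res ++ [m]) hnd'
      rw [pv_pyGet_append_last] at this
      exact this
    show (match (match pvScanB d.items pred₁ with
            | none => pvScanB d.items pred₂
            | some b => some b) with
          | none => none
          | some (i, m, c) =>
            loopB (PySem.List.pySetD d.items i (m, c - 1)) (res ++ [m]) (some m) n) =
        greedyGo d res (n + 1)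
    cases hs1 : pvScanB d.items pred₁ with
    | some b =>
      rcases b with ⟨i, m, c⟩
      rw [hs1] at inv₁
      cases hm1 : PySem.List.max? ((d.items.filter pred₁).map Prod.fst) key with
      | none => rw [hm1] at inv₁; exact absurd inv₁ (by simp [pvInv])
      | some nm =>
        rw [hm1] at inv₁
        have hnm : nm = m := inv₁.1
        have hcands : pvCands d res = (d.items.filter pred₁).map Prod.fst := by
          unfold pvCands
          rw [if_neg]
          intro hemp
          rw [List.isEmpty_iff.mp hemp] at hm1
          simp [PySem.List.max?] at hm1
        rw [greedyGo_succ_some d res n m (by rw [hcands, hm1, hnm])]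
        simp only []
        exact hcont i m c pred₁ hs1
    | none =>
      rw [hs1] at inv₁
      have hm1 : PySem.List.max? ((d.items.filter pred₁).map Prod.fst) key = none := by
        cases hm : PySem.List.max? ((d.items.filter pred₁).map Prod.fst) key with
        | none => rfl
        | some nm => rw [hm] at inv₁; exact absurd inv₁ (by simp [pvInv])
      have hnil₁ : (d.items.filter pred₁).map Prod.fst = [] :=
        (PySem.List.max?_eq_none_iff _ _).mp hm1
      have hcands : pvCands d res = (d.items.filter pred₂).map Prod.fst := by
        unfold pvCands
        rw [if_pos (by rw [List.isEmpty_iff]; exact hnil₁)]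
      cases hs2 : pvScanB d.items pred₂ with
      | some b =>
        rcases b with ⟨i, m, c⟩
        rw [hs2] at inv₂
        cases hm2 : PySem.List.max? ((d.items.filter pred₂).map Prod.fst) key with
        | none => rw [hm2] at inv₂; exact absurd inv₂ (by simp [pvInv])
        | some nm =>
          rw [hm2] at inv₂
          have hnm : nm = m := inv₂.1
          rw [greedyGo_succ_some d res n m (by rw [hcands, hm2, hnm])]
          simp only []
          exact hcont i m c pred₂ hs2
      | none =>
        rw [hs2] at inv₂
        have hm2 : PySem.List.max? ((d.items.filter pred₂).map Prod.fst) key = none := by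
          cases hm : PySem.List.max? ((d.items.filter pred₂).map Prod.fst) key with
          | none => rfl
          | some nm => rw [hm] at inv₂; exact absurd inv₂ (by simp [pvInv])
        rw [greedyGo_succ_none d res n (by rw [hcands]; exact hm2)]

-- ===== VERDICT (by name: the statement is the Claim_ definition above) =====
theorem backtrack_shuffle_spec : Claim_equal_backtrack_shuffle := by
  intro playlist movie_counts _
  unfold Spec_backtrack_shuffle backtrack_shuffle backtrack_shuffle_alt
  have hnd := PySem.Dict.nodup_keys_ofList movie_counts
  have hA := pv_main playlist (playlist.length + 1) (PySem.Dict.ofList movie_counts) []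
    hnd (by simp) (by simp)
  have hB := pv_loopB_eq_greedy playlist.length (PySem.Dict.ofList movie_counts) [] hnd
  simp only [Nat.sub_zero, List.length_nil] at hA
  rw [hA, ← hB]
  rfl
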